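-- pv_equiv track=rewrite | github.com/MMaxouB/calcul_nombres_premiers | premiers+multi+crible.py | mark_block
-- ===== SOURCE A (Python) =====
-- def mark_block(args):
--     """Marque les nombres composés dans l'intervalle [start, end) en utilisant
--     la liste `primes_small` (tous les premiers ≤ sqrt(MAX_N)).
--
--     Retourne une liste booléenne `block` où True signifie "potentiellement premier".
--     """
--     start, end, primes_small = args
--     block = [True] * (end - start)
--
--     # Pour chaque petit premier p, marquer ses multiples dans le bloc
--     for p in primes_small:
--         # Le premier multiple de p >= start. On prend au moins p*p.
--         first = max(p * p, ((start + p - 1) // p) * p)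
--         for multiple in range(first, end, p):
--             block[multiple - start] = False
--     return block
-- ===== SOURCE B (Python) =====
-- def mark_block(args):
--     """Position-major trial division: for each n in [start, end), n is kept
--     (True) iff no small prime p divides it with p*p <= n."""
--     start, end, primes_small = args
--     block = []
--     for i in range(end - start):
--         n = start + i
--         block.append(not any(n % p == 0 and p * p <= n for p in primes_small))
--     return block
-- ===== Notes on version B (the rewrite author's own statement) =====
-- stated objective: alternative
-- what changed: Replaced the prime-major stride marking (for each small prime, stamp False over its multiples from max(p*p, first multiple >= start)) by a position-major trial-division pass: build the block left to right, keeping n = start+i True iff no p in primes_small divides n with p*p <= n.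
-- outside the precondition, e.g. on mark_block((4, 6, [-2])): A returns [True, True], B returns [False, True]
import Mathlib
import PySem

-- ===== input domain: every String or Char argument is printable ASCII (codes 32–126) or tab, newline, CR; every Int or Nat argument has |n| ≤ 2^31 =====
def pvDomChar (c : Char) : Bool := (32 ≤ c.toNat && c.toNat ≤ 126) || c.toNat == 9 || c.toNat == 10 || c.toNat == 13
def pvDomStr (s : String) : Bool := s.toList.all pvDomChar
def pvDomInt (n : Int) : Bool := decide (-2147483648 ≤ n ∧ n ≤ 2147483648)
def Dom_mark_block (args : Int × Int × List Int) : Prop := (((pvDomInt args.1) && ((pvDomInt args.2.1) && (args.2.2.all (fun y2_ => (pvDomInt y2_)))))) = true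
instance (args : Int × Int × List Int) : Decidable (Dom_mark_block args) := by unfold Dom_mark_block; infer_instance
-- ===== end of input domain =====

-- B replaces A's prime-major stride marking by a position-major trial-division pass
-- computing the same block (alternative decomposition, not faster).


-- ===== PORT A =====
def mark_block (args : Int × Int × List Int) : List Bool :=
  let start := args.1
  let stop := args.2.1
  let primes := args.2.2
  let block := List.replicate (stop - start).toNat true
  primes.foldl (fun block p =>
    let first := max (p * p) (PySem.Int.floordiv (start + p - 1) p * p)
    (PySem.List.pyRange first stop p).foldl
      (fun block m => block.set (m - start).toNat false) block) block

-- ===== PORT B =====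
def mark_block_alt (args : Int × Int × List Int) : List Bool :=
  let start := args.1
  let stop := args.2.1
  let primes := args.2.2
  (List.range (stop - start).toNat).map (fun (i : Nat) =>
    let n : Int := start + (i : Int)
    ! primes.any (fun p => decide (PySem.Int.mod n p = 0) && decide (p * p ≤ n)))

-- ===== PRECONDITION & SPEC =====
-- Pre_ restricts primes_small to positive entries, the function's natural domain (small
-- primes): on an entry 0 A raises ZeroDivisionError, and on negative entries A's
-- descending range either raises IndexError or silently marks nothing, an artefact of
-- the stride implementation that B does not reproduce.
def Pre_mark_block (args : Int × Int × List Int) : Prop := ∀ p ∈ args.2.2, (1 : Int) ≤ p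
instance (args : Int × Int × List Int) : Decidable (Pre_mark_block args) := by unfold Pre_mark_block; infer_instance
def pvWitness_mark_block : (Int × Int × List Int) := (10, 20, [2, 3, 5])

def Spec_mark_block (args : Int × Int × List Int) (out : List Bool) : Prop := out = mark_block_alt args
instance (args : Int × Int × List Int) (out : List Bool) : Decidable (Spec_mark_block args out) := by unfold Spec_mark_block; infer_instance

-- ===== CLAIM (what is proved, stated in full; the proofs are below) =====
def Claim_equal_mark_block : Prop := ∀ (args : Int × Int × List Int), Dom_mark_block args → Pre_mark_block args → Spec_mark_block args (mark_block args)

-- ===== LEMMAS AND PROOFS =====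

-- A's inner fold (stamping False at index m - start) preserves the length.
theorem pv_len_foldSet (start : Int) (ms : List Int) (block : List Bool) :
    (ms.foldl (fun b m => b.set (m - start).toNat false) block).length = block.length := by
  induction ms generalizing block with
  | nil => rfl
  | cons m ms ih => simp [List.foldl_cons, ih]

-- Elementwise description of the inner fold: index i becomes False iff start+i occurs in ms.
theorem pv_foldSet_getElem? (start : Int) (ms : List Int) (hms : ∀ m ∈ ms, start ≤ m)
    (block : List Bool) (i : Nat) :
    (ms.foldl (fun b m => b.set (m - start).toNat false) block)[i]? =
      if (start + (i : Int)) ∈ ms ∧ i < block.length then some false else block[i]? := by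
  induction ms generalizing block with
  | nil => simp
  | cons m ms ih =>
      have hm : start ≤ m := hms m (List.mem_cons_self ..)
      rw [List.foldl_cons, ih (fun x hx => hms x (List.mem_cons_of_mem _ hx))]
      have hlen : (block.set (m - start).toNat false).length = block.length := by simp
      rw [hlen]
      have hset : (block.set (m - start).toNat false)[i]? =
          if m = start + (i : Int) ∧ i < block.length then some false else block[i]? := by
        rw [List.getElem?_set]
        by_cases h : (m - start).toNat = i
        · have he : m = start + (i : Int) := by omega
          by_cases h2 : i < block.length
          · simp [he, h2]
          · simp [he, h2]
        · have hne : ¬ (m = start + (i : Int)) := by omega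
          simp [h, hne]
      rw [hset]
      by_cases h2 : i < block.length
      · by_cases h1 : start + (i : Int) ∈ ms <;> by_cases h3 : m = start + (i : Int) <;>
          simp [h1, h2, h3, List.mem_cons, eq_comm]
      · by_cases h1 : start + (i : Int) ∈ ms <;> by_cases h3 : m = start + (i : Int) <;>
          simp [h1, h2, h3, List.mem_cons]

-- first := max (p*p, ceil(start/p)*p) is a multiple of p.
theorem pv_first_dvd (start p : Int) :
    p ∣ max (p * p) (PySem.Int.floordiv (start + p - 1) p * p) := by
  rcases le_total (p * p) (PySem.Int.floordiv (start + p - 1) p * p) with h | h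
  · rw [max_eq_right h]; exact dvd_mul_left p _
  · rw [max_eq_left h]; exact dvd_mul_right p p

-- For a multiple n of p, first ≤ n ↔ (p*p ≤ n and start ≤ n).
theorem pv_first_le_iff (start p n : Int) (hp : (1:Int) ≤ p) (hdvd : p ∣ n) :
    max (p * p) (PySem.Int.floordiv (start + p - 1) p * p) ≤ n ↔ p * p ≤ n ∧ start ≤ n := by
  have hp0 : (0:Int) < p := by omega
  have hq := PySem.Int.floordiv_mul_add_mod (start + p - 1) p
  have hr0 := PySem.Int.mod_nonneg (start + p - 1) hp0
  have hr1 := PySem.Int.mod_lt (start + p - 1) hp0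
  set q := PySem.Int.floordiv (start + p - 1) p with hqdef
  constructor
  · intro h
    refine ⟨le_trans (le_max_left _ _) h, ?_⟩
    have h2 : q * p ≤ n := le_trans (le_max_right _ _) h
    omega
  · rintro ⟨h1, h2⟩
    obtain ⟨k, hk⟩ := hdvd
    have hqk : q * p < (k + 1) * p := by nlinarith
    have hlt : q < k + 1 := lt_of_mul_lt_mul_right hqk (le_of_lt hp0)
    have hle : q * p ≤ k * p := mul_le_mul_of_nonneg_right (by omega) (le_of_lt hp0)
    have : q * p ≤ n := by nlinarith
    exact max_le h1 this

-- Membership in A's marking range, for an in-block value n, is B's predicate.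
theorem pv_mem_range_iff (start stop p n : Int) (hp : (1:Int) ≤ p)
    (hn : start ≤ n) (hn2 : n < stop) :
    n ∈ PySem.List.pyRange (max (p * p) (PySem.Int.floordiv (start + p - 1) p * p)) stop p ↔
      (p ∣ n ∧ p * p ≤ n) := by
  rw [PySem.List.mem_pyRange_iff_of_pos (by omega : (0:Int) < p)]
  have hf := pv_first_dvd start p
  constructor
  · rintro ⟨h1, h2, h3⟩
    have hdn : p ∣ n := by
      have := dvd_add h3 hf
      simpa using this
    exact ⟨hdn, ((pv_first_le_iff start p n hp hdn).1 h1).1⟩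
  · rintro ⟨h1, h2⟩
    exact ⟨(pv_first_le_iff start p n hp h1).2 ⟨h2, hn⟩, hn2, dvd_sub h1 hf⟩

-- Every element of A's marking range is ≥ start.
theorem pv_range_ge (start stop p : Int) (hp : (1:Int) ≤ p) :
    ∀ m ∈ PySem.List.pyRange (max (p * p) (PySem.Int.floordiv (start + p - 1) p * p)) stop p,
      start ≤ m := by
  intro m hm
  rw [PySem.List.mem_pyRange_iff_of_pos (by omega : (0:Int) < p)] at hm
  have hdm : p ∣ m := by
    have := dvd_add hm.2.2 (pv_first_dvd start p)
    simpa using this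
  exact ((pv_first_le_iff start p m hp hdm).1 hm.1).2

-- Outer fold over the primes, elementwise: index i of the block ends up False
-- exactly when some prime p divides start+i with p*p ≤ start+i.
theorem pv_fold_primes (start stop : Int) (primes : List Int)
    (hp : ∀ p ∈ primes, (1:Int) ≤ p) :
    ∀ (block : List Bool) (i : Nat), i < block.length → ((block.length : Int) = stop - start) →
    (primes.foldl (fun block p =>
        let first := max (p * p) (PySem.Int.floordiv (start + p - 1) p * p)
        (PySem.List.pyRange first stop p).foldl
          (fun block m => block.set (m - start).toNat false) block) block)[i]? =
      if primes.any (fun p => decide (PySem.Int.mod (start + (i : Int)) p = 0) && decide (p * p ≤ start + (i : Int)))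
      then some false else block[i]? := by
  induction primes with
  | nil => intro block i h1 h2; simp
  | cons p ps ih =>
      intro block i h1 h2
      have hp1 : (1:Int) ≤ p := hp p (List.mem_cons_self ..)
      rw [List.foldl_cons]
      have hlen := pv_len_foldSet start (PySem.List.pyRange (max (p * p) (PySem.Int.floordiv (start + p - 1) p * p)) stop p) block
      rw [ih (fun q hq => hp q (List.mem_cons_of_mem _ hq)) _ i (by simpa [pv_len_foldSet] using h1) (by simpa [pv_len_foldSet] using h2)]
      have hni : start ≤ start + (i : Int) := by
        have := Int.natCast_nonneg i; omega
      have hn2 : start + (i : Int) < stop := by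
        have hcast : (i:Int) < (block.length : Int) := by exact_mod_cast h1
        omega
      rw [pv_foldSet_getElem? start _ (pv_range_ge start stop p hp1) block i]
      have hmem : ((start + (i : Int)) ∈ PySem.List.pyRange (max (p * p) (PySem.Int.floordiv (start + p - 1) p * p)) stop p) ↔ (p ∣ (start + (i : Int)) ∧ p * p ≤ start + (i : Int)) :=
        pv_mem_range_iff start stop p _ hp1 hni hn2
      simp only [List.any_cons]
      by_cases hfp : (decide (PySem.Int.mod (start + (i : Int)) p = 0) && decide (p * p ≤ start + (i : Int))) = true
      · have hcnd : p ∣ (start + (i : Int)) ∧ p * p ≤ start + (i : Int) := by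
          simpa [PySem.Int.mod_eq_zero_iff_dvd] using hfp
        simp only [hfp, Bool.true_or, reduceIte]
        split_ifs with h1' h2'
        · rfl
        · rfl
        · exact absurd ⟨hmem.2 hcnd, h1⟩ h2'
      · rw [Bool.not_eq_true] at hfp
        have hcnd : ¬ (p ∣ (start + (i : Int)) ∧ p * p ≤ start + (i : Int)) := by
          intro h
          have htrue : (decide (PySem.Int.mod (start + (i : Int)) p = 0) && decide (p * p ≤ start + (i : Int))) = true := by
            simp [PySem.Int.mod_eq_zero_iff_dvd, h.1, h.2]
          rw [hfp] at htrue
          exact Bool.false_ne_true htrue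
        have hnm : (start + (i : Int)) ∉ PySem.List.pyRange (max (p * p) (PySem.Int.floordiv (start + p - 1) p * p)) stop p :=
          fun h => hcnd (hmem.1 h)
        simp only [hfp, Bool.false_or]
        by_cases hps : (ps.any fun p => decide (PySem.Int.mod (start + (i : Int)) p = 0) && decide (p * p ≤ start + (i : Int))) = true
        · rw [if_pos hps, if_pos hps]
        · rw [if_neg hps, if_neg hps, if_neg (fun h => hnm h.1)]

-- The whole of A's fold preserves the block length.
theorem pv_len_fold_primes (start stop : Int) (primes : List Int) (block : List Bool) :
    (primes.foldl (fun block p =>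
        let first := max (p * p) (PySem.Int.floordiv (start + p - 1) p * p)
        (PySem.List.pyRange first stop p).foldl
          (fun block m => block.set (m - start).toNat false) block) block).length = block.length := by
  induction primes generalizing block with
  | nil => rfl
  | cons p ps ih => rw [List.foldl_cons]; rw [ih]; simpa using pv_len_foldSet start _ block

theorem pv_main : ∀ (args : Int × Int × List Int), (∀ p ∈ args.2.2, (1:Int) ≤ p) →
    mark_block args = mark_block_alt args := by
  rintro ⟨start, stop, primes⟩ hpre
  unfold mark_block mark_block_alt
  simp only []
  apply List.ext_getElem?
  intro i
  by_cases hi : i < (stop - start).toNat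
  · have hL : ((List.replicate (stop - start).toNat (true : Bool)).length : Int) = stop - start := by
      simp only [List.length_replicate]
      have : 0 < (stop - start).toNat := by omega
      omega
    rw [pv_fold_primes start stop primes hpre _ i (by simpa using hi) hL]
    rw [List.getElem?_map, List.getElem?_range hi]
    rw [List.getElem?_replicate, if_pos hi]
    by_cases h : (primes.any fun p => decide (PySem.Int.mod (start + (i:Int)) p = 0) && decide (p * p ≤ start + (i:Int))) = true
    · rw [if_pos h]; simp [h]
    · rw [if_neg h]; rw [Bool.not_eq_true] at h; simp [h]
  · have h1 : (primes.foldl (fun block p =>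
        let first := max (p * p) (PySem.Int.floordiv (start + p - 1) p * p)
        (PySem.List.pyRange first stop p).foldl
          (fun block m => block.set (m - start).toNat false) block) (List.replicate (stop - start).toNat true))[i]? = none := by
      rw [List.getElem?_eq_none_iff, pv_len_fold_primes]
      simpa using Nat.le_of_not_lt hi
    rw [h1, List.getElem?_eq_none_iff.2 (by simpa using Nat.le_of_not_lt hi)]

-- ===== VERDICT (by name: the statement is the Claim_ definition above) =====
theorem mark_block_spec : Claim_equal_mark_block := by
  intro args _ hpre
  unfold Spec_mark_block
  exact pv_main args hpre
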